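-- pv_equiv track=rewrite | github.com/vectrus/md_convertor_pro | convertor_core.py | preprocess_markdown_lists
-- ===== SOURCE A (Python) =====
-- def preprocess_markdown_lists(content):
--     """Preprocess markdown content to ensure proper list formatting"""
--     lines = content.split('\n')
--     result = []
--     in_list = False
--
--     for i, line in enumerate(lines):
--         # Check if this line is a list item
--         is_list_item = line.strip().startswith(('-', '*', '+')) or (line.strip() and line.strip()[0].isdigit() and '.' in line.strip()[:3])
--
--         # If entering a list
--         if is_list_item and not in_list:
--             in_list = True
--             # Ensure there's a blank line before the list if not at the beginning
--             if i > 0 and result and result[-1].strip():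
--                 result.append('')
--
--         # If exiting a list
--         elif not is_list_item and in_list and line.strip():
--             in_list = False
--             # Ensure there's a blank line after the list
--             if result and result[-1].strip():
--                 result.append('')
--
--         # Process list items to ensure proper formatting
--         if is_list_item:
--             # For bullet lists, ensure proper spacing
--             if line.strip().startswith(('-', '*', '+')):
--                 marker = line.strip()[0]
--                 text = line.strip()[1:].strip()
--                 # Ensure the list item has a space after the marker
--                 line = f"{marker} {text}"
--             # For numbered lists, ensure proper spacing
--             elif line.strip() and line.strip()[0].isdigit() and '.' in line.strip()[:3]:
--                 parts = line.strip().split('.', 1)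
--                 number = parts[0]
--                 text = parts[1].strip()
--                 # Ensure the list item has a space after the marker
--                 line = f"{number}. {text}"
--
--         result.append(line)
--
--     return '\n'.join(result)
-- ===== SOURCE B (Python) =====
-- def preprocess_markdown_lists(content):
--     """Preprocess markdown content to ensure proper list formatting.
--
--     Stateless reformulation: A's in_list state machine is equivalent to a
--     purely local rule on adjacent lines (because a blank can only be inserted
--     when the previous emitted line is non-blank, and then the flag coincides with the
--     previous line's own list-item mark.)  So: one pure pass classifying and
--     reformatting every line, then a stateless zip over (previous, current)
--     pairs deciding blank insertion from the neighbours alone.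
--     """
--     def is_item(line):
--         s = line.strip()
--         return s.startswith(('-', '*', '+')) or (bool(s) and s[0].isdigit() and '.' in s[:3])
--
--     def reformat(line):
--         s = line.strip()
--         if s.startswith(('-', '*', '+')):
--             return f"{s[0]} {s[1:].strip()}"
--         number, rest = s.split('.', 1)
--         return f"{number}. {rest.strip()}"
--
--     records = [(line, is_item(line), reformat(line) if is_item(line) else line)
--                for line in content.split('\n')]
--
--     def pieces(prev, cur):
--         line, mark, text = cur
--         blank = (prev is not None and prev[2].strip() != ''
--                  and mark != prev[1] and (mark or line.strip() != ''))
--         return ([''] if blank else []) + [text]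
--
--     return '\n'.join(s for prev, cur in zip([None] + records, records)
--                        for s in pieces(prev, cur))
-- ===== Notes on version B (the rewrite author's own statement) =====
-- stated objective: alternative
-- what changed: A is a single-pass state machine (in_list flag, result[-1] inspection, enter/exit branches); B proves the state away: it classifies/reformats every line in one pure pass and then inserts blanks by a stateless local rule on adjacent (previous, current) line pairs via zip, using the fact that whenever a blank can be inserted the flag coincides with the previous line's own list-item mark.
import Mathlib
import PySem

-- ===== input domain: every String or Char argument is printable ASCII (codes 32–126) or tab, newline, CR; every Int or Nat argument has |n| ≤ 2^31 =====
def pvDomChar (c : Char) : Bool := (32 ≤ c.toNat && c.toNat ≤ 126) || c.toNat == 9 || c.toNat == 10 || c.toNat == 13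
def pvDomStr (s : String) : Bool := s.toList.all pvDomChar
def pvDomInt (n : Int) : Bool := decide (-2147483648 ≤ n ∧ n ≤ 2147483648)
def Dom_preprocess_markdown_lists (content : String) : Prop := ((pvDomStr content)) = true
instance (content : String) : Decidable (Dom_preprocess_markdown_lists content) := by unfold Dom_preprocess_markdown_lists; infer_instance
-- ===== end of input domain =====

-- B replaces A's in_list state machine by a pure classify/reformat pass followed by a stateless
-- local rule on adjacent line pairs (zip); same return value, no speed claim.

-- ===== PORT A =====
-- is_list_item = line.strip().startswith(('-','*','+')) or (line.strip() and line.strip()[0].isdigit() and '.' in line.strip()[:3])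
-- (s[0] is guarded by the truthiness of s, so the `.elim false` default is never the decider)
def pvA_isItem (line : String) : Bool :=
  (PySem.Str.startswith (PySem.Str.strip line) "-"
    || PySem.Str.startswith (PySem.Str.strip line) "*"
    || PySem.Str.startswith (PySem.Str.strip line) "+")
  || ((!(PySem.Str.strip line == ""))
      && ((PySem.Str.pyGet? (PySem.Str.strip line) 0).elim false PySem.Chars.isdigit)
      && PySem.Str.isIn "." (PySem.Str.slice (PySem.Str.strip line) none (some 3)))

-- the "Process list items to ensure proper formatting" block of A (reassignment of `line`);
-- marker = s[0] and parts[0]/parts[1] are guarded in A, so the .getD defaults are never the decider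
def pvA_format (line : String) : String :=
  if pvA_isItem line then
    if PySem.Str.startswith (PySem.Str.strip line) "-"
        || PySem.Str.startswith (PySem.Str.strip line) "*"
        || PySem.Str.startswith (PySem.Str.strip line) "+" then
      String.singleton ((PySem.Str.pyGet? (PySem.Str.strip line) 0).getD ' ') ++ " "
        ++ PySem.Str.strip (PySem.Str.slice (PySem.Str.strip line) (some 1) none)
    else if (!(PySem.Str.strip line == ""))
        && ((PySem.Str.pyGet? (PySem.Str.strip line) 0).elim false PySem.Chars.isdigit)
        && PySem.Str.isIn "." (PySem.Str.slice (PySem.Str.strip line) none (some 3)) then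
      (((PySem.Str.splitMax? (PySem.Str.strip line) "." 1).getD []).getD 0 "") ++ ". "
        ++ PySem.Str.strip (((PySem.Str.splitMax? (PySem.Str.strip line) "." 1).getD []).getD 1 "")
    else line
  else line

-- A's loop body over state (result, in_list) and the enumerated (i, line);
-- result[-1] is guarded by `result` being non-empty, so pyGet?'s .getD "" is never the decider
def pvA_step (st : List String × Bool) (p : Int × String) : List String × Bool :=
  match (if pvA_isItem p.2 && !st.2 then
      (if decide (p.1 > 0) && !st.1.isEmpty
          && !(PySem.Str.strip ((PySem.List.pyGet? st.1 (-1)).getD "") == "") then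
        st.1 ++ [""] else st.1, true)
    else if !pvA_isItem p.2 && st.2 && !(PySem.Str.strip p.2 == "") then
      (if !st.1.isEmpty
          && !(PySem.Str.strip ((PySem.List.pyGet? st.1 (-1)).getD "") == "") then
        st.1 ++ [""] else st.1, false)
    else (st.1, st.2)) with
  | (result, in_list) => (result ++ [pvA_format p.2], in_list)

-- content.split('\n') is always a some (separator "\n" ≠ ""), so the .getD [] is never the decider
def preprocess_markdown_lists (content : String) : String :=
  PySem.Str.join "\n"
    (((PySem.List.enumerate ((PySem.Str.split? content "\n").getD []) 0).foldl
        pvA_step ([], false)).1)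

-- ===== PORT B =====
-- B's helper is_item(line)
def pvB_isItem (line : String) : Bool :=
  (PySem.Str.startswith (PySem.Str.strip line) "-"
    || PySem.Str.startswith (PySem.Str.strip line) "*"
    || PySem.Str.startswith (PySem.Str.strip line) "+")
  || ((!(PySem.Str.strip line == ""))
      && ((PySem.Str.pyGet? (PySem.Str.strip line) 0).elim false PySem.Chars.isdigit)
      && PySem.Str.isIn "." (PySem.Str.slice (PySem.Str.strip line) none (some 3)))

-- B's helper reformat(line) (only ever called on list items, where the split has 2 parts,
-- so the .getD defaults are never the decider)
def pvB_reformat (line : String) : String :=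
  if PySem.Str.startswith (PySem.Str.strip line) "-"
      || PySem.Str.startswith (PySem.Str.strip line) "*"
      || PySem.Str.startswith (PySem.Str.strip line) "+" then
    String.singleton ((PySem.Str.pyGet? (PySem.Str.strip line) 0).getD ' ') ++ " "
      ++ PySem.Str.strip (PySem.Str.slice (PySem.Str.strip line) (some 1) none)
  else
    (((PySem.Str.splitMax? (PySem.Str.strip line) "." 1).getD []).getD 0 "") ++ ". "
      ++ PySem.Str.strip (((PySem.Str.splitMax? (PySem.Str.strip line) "." 1).getD []).getD 1 "")

-- the first (pure) pass: (line, is_item(line), reformat-or-line)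
def pvB_record (line : String) : String × Bool × String :=
  (line, pvB_isItem line, if pvB_isItem line then pvB_reformat line else line)

-- pieces(prev, cur): the stateless local blank-insertion rule on an adjacent pair
def pvB_pieces (prev : Option (String × Bool × String)) (cur : String × Bool × String) :
    List String :=
  (if (match prev with
       | none => false
       | some p => !(PySem.Str.strip p.2.2 == "") && (cur.2.1 != p.2.1)
           && (cur.2.1 || !(PySem.Str.strip cur.1 == ""))) then [""] else []) ++ [cur.2.2]

-- zip([None] + records, records) flattened through pieces (zip truncates to len(records))
def preprocess_markdown_lists_alt (content : String) : String :=
  PySem.Str.join "\n"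
    (((none :: (((PySem.Str.split? content "\n").getD []).map pvB_record).map some).zip
        (((PySem.Str.split? content "\n").getD []).map pvB_record)).flatMap
      (fun pc => pvB_pieces pc.1 pc.2))

-- ===== PRECONDITION & SPEC =====
def Spec_preprocess_markdown_lists (content : String) (out : String) : Prop := out = preprocess_markdown_lists_alt content
instance (content : String) (out : String) : Decidable (Spec_preprocess_markdown_lists content out) := by unfold Spec_preprocess_markdown_lists; infer_instance

-- ===== CLAIM (what is proved, stated in full; the proofs are below) =====
def Claim_equal_preprocess_markdown_lists : Prop := ∀ (content : String), Dom_preprocess_markdown_lists content → Spec_preprocess_markdown_lists content (preprocess_markdown_lists content)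

-- ===== LEMMAS AND PROOFS =====

-- xs[-1] of a non-empty list is its last element
lemma pv_pyGet_neg_one (ys : List String) (y : String) :
    PySem.List.pyGet? (ys ++ [y]) (-1) = some y := by
  simp [PySem.List.pyGet?, PySem.List.pyIdx?]

lemma pv_format_of_not_item (line : String) (h : pvA_isItem line = false) :
    pvA_format line = line := by
  unfold pvA_format; rw [h]; simp

-- B's record fields are exactly A's predicate and A's reformatted line
lemma pv_record_eq (line : String) :
    pvB_record line = (line, pvA_isItem line, pvA_format line) := by
  unfold pvB_record pvB_isItem pvB_reformat pvA_format pvA_isItem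
  by_cases h1 : (PySem.Str.startswith (PySem.Str.strip line) "-"
      || PySem.Str.startswith (PySem.Str.strip line) "*"
      || PySem.Str.startswith (PySem.Str.strip line) "+") = true
  · simp only [h1]; simp
  · rw [Bool.not_eq_true] at h1
    simp only [h1]
    by_cases h2 : ((!(PySem.Str.strip line == ""))
        && ((PySem.Str.pyGet? (PySem.Str.strip line) 0).elim false PySem.Chars.isdigit)
        && PySem.Str.isIn "." (PySem.Str.slice (PySem.Str.strip line) none (some 3))) = true
    · simp only [h2]; simp
    · rw [Bool.not_eq_true] at h2
      simp only [h2]; simp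

-- B's zipped flatMap, recursively: chain of pieces with an explicit previous record
def pvChain (prev : Option (String × Bool × String)) :
    List (String × Bool × String) → List String
  | [] => []
  | c :: cs => pvB_pieces prev c ++ pvChain (some c) cs

lemma pv_zip_flatMap (recs : List (String × Bool × String))
    (p : Option (String × Bool × String)) :
    ((p :: recs.map some).zip recs).flatMap (fun pc => pvB_pieces pc.1 pc.2)
      = pvChain p recs := by
  induction recs generalizing p with
  | nil => rfl
  | cons c cs ih => simp [pvChain, List.zip_cons_cons, ← ih (some c)]

-- the invariant linking A's loop state to the previous original line
def pvInv (prev : Option String) (i : Int) (result : List String) (in_list : Bool) : Prop :=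
  match prev with
  | none => i = 0 ∧ result = []
  | some p => (∃ r', result = r' ++ [pvA_format p]) ∧ 0 < i ∧
      (pvA_isItem p = true → in_list = true) ∧
      (pvA_isItem p = false → ¬ (PySem.Str.strip p = "") → in_list = false)

-- one step of A emits exactly B's pieces for the pair (prev, line), and re-establishes the invariant
set_option maxHeartbeats 4000000 in
lemma pv_step_eq (l : String) (i : Int) (result : List String) (in_list : Bool)
    (prev : Option String) (h : pvInv prev i result in_list) :
    (pvA_step (result, in_list) (i, l)).1
        = result ++ pvB_pieces (prev.map pvB_record) (pvB_record l)
      ∧ pvInv (some l) (i + 1) (pvA_step (result, in_list) (i, l)).1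
          (pvA_step (result, in_list) (i, l)).2 := by
  cases prev with
  | none =>
    obtain ⟨hi, hr⟩ := h
    subst hi hr
    unfold pvA_step pvB_pieces pvInv
    rw [pv_record_eq]
    cases hb : pvA_isItem l <;> cases in_list <;>
      by_cases hls : PySem.Str.strip l = "" <;>
      simp [hb, hls]
  | some p =>
    obtain ⟨⟨r', hr⟩, hi, hit, hnit⟩ := h
    subst hr
    unfold pvA_step pvB_pieces pvInv
    simp only [Option.map_some, pv_record_eq]
    by_cases hpf : PySem.Str.strip (pvA_format p) = ""
    · -- previous emitted line is blank: no blank line is inserted on either side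
      cases hb : pvA_isItem l <;> cases hl : in_list <;>
        by_cases hls : PySem.Str.strip l = "" <;>
        simp [hb, hpf, hls, pv_pyGet_neg_one, hi] <;>
        first
          | omega
          | (refine ⟨⟨r' ++ [pvA_format p], ?_⟩, by omega⟩; simp; done)
          | (refine ⟨⟨r' ++ [pvA_format p, ""], ?_⟩, by omega⟩; simp; done)
    · -- previous emitted line is non-blank: here in_list = pvA_isItem p
      have hin : in_list = pvA_isItem p := by
        cases hp : pvA_isItem p with
        | true => exact hit hp
        | false =>
          have := pv_format_of_not_item p hp
          exact hnit hp (by rwa [this] at hpf)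
      subst hin
      cases hb : pvA_isItem l <;> cases hp : pvA_isItem p <;>
        by_cases hls : PySem.Str.strip l = "" <;>
        simp [hb, hp, hpf, hls, pv_pyGet_neg_one, hi] <;>
        first
          | omega
          | (refine ⟨⟨r' ++ [pvA_format p], ?_⟩, by omega⟩; simp; done)
          | (refine ⟨⟨r' ++ [pvA_format p, ""], ?_⟩, by omega⟩; simp; done)

-- A's fold from any invariant state appends exactly B's chain of pieces
set_option maxHeartbeats 4000000 in
lemma pv_fold_eq (lines : List String) (i : Int) (result : List String) (in_list : Bool)
    (prev : Option String) (h : pvInv prev i result in_list) :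
    ((PySem.List.enumerate lines i).foldl pvA_step (result, in_list)).1
      = result ++ pvChain (prev.map pvB_record) (lines.map pvB_record) := by
  induction lines generalizing i result in_list prev with
  | nil => simp [PySem.List.enumerate_nil, pvChain]
  | cons l rest ih =>
    obtain ⟨h1, h2⟩ := pv_step_eq l i result in_list prev h
    have hrec := ih (i + 1) (pvA_step (result, in_list) (i, l)).1
      (pvA_step (result, in_list) (i, l)).2 (some l) h2
    simp only [Prod.mk.eta, Option.map_some] at hrec
    simp only [PySem.List.enumerate_cons, List.foldl_cons, List.map_cons, pvChain,
      Option.map_some]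
    rw [hrec, h1, List.append_assoc]

-- ===== VERDICT (by name: the statement is the Claim_ definition above) =====
theorem preprocess_markdown_lists_spec : Claim_equal_preprocess_markdown_lists := by
  intro content _
  unfold Spec_preprocess_markdown_lists preprocess_markdown_lists preprocess_markdown_lists_alt
  rw [pv_fold_eq ((PySem.Str.split? content "\n").getD []) 0 [] false none ⟨rfl, rfl⟩,
    pv_zip_flatMap]
  rfl
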